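-- pv_equiv track=rewrite | github.com/griquelme/tidyms | tidyms/chem/formula.py | _get_ch_string
-- ===== SOURCE A (Python) =====
-- from typing import List, Tuple, Dict, Optional
--
-- def _symbol_to_subformula_str(symbol: str, a: int, coefficient: int,
--                               is_most_abundant=True) -> str:
--     """
--     convert a symbol, mass number and formula coefficient into a formula
--     substring.
--     """
--     res = symbol
--     if not is_most_abundant:
--         res = "(" + str(a) + res + ")"
--     if coefficient > 1:
--         res += str(coefficient)
--     return res
--
-- def _get_ch_string(symbols: List[str], mass_numbers: List[int],
--                    coefficients: List[int],
--                    is_monoisotope: List[bool]) -> str: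
--     """
--     get the formula substring for C and H in a list of symbols, mass numbers
--     and coefficients. Remove occurrences of C and H from the lists.
--     """
--     ch = ["C", "H"]
--     res = ""
--     for c in ch:
--         try:
--             while True:
--                 ind = symbols.index(c)
--                 c_coefficient = coefficients.pop(ind)
--                 c_symbol = symbols.pop(ind)
--                 c_mass_number = mass_numbers.pop(ind)
--                 c_repeated = is_monoisotope.pop(ind)
--                 res += _symbol_to_subformula_str(c_symbol, c_mass_number,
--                                                  c_coefficient,
--                                                  is_most_abundant=c_repeated)
--         except ValueError:
--             continue
--     return res
-- ===== SOURCE B (Python) =====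
-- from typing import List
--
--
-- def _get_ch_string(symbols: List[str], mass_numbers: List[int],
--                    coefficients: List[int],
--                    is_monoisotope: List[bool]) -> str:
--     # Single pass: partition entries into C parts, H parts and kept entries,
--     # then rebuild the lists in place and join the substring.
--     c_parts, h_parts = [], []
--     ks, km, kc, ki = [], [], [], []
--     for s, m, co, mono in zip(symbols, mass_numbers, coefficients,
--                               is_monoisotope):
--         if s == "C" or s == "H":
--             part = s if mono else "(" + str(m) + s + ")"
--             if co > 1:
--                 part += str(co)
--             (c_parts if s == "C" else h_parts).append(part)
--         else:
--             ks.append(s)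
--             km.append(m)
--             kc.append(co)
--             ki.append(mono)
--     symbols[:] = ks
--     mass_numbers[:] = km
--     coefficients[:] = kc
--     is_monoisotope[:] = ki
--     return "".join(c_parts + h_parts)
-- ===== Notes on version B (the rewrite author's own statement) =====
-- stated objective: simpler
-- what changed: A rescans and pops the four lists with list.index/list.pop once per C/H occurrence inside exception-driven while/try loops; B makes one plain zip pass that partitions entries into C parts, H parts and kept entries, rebuilds the lists in place and joins the substring.
import Mathlib
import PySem

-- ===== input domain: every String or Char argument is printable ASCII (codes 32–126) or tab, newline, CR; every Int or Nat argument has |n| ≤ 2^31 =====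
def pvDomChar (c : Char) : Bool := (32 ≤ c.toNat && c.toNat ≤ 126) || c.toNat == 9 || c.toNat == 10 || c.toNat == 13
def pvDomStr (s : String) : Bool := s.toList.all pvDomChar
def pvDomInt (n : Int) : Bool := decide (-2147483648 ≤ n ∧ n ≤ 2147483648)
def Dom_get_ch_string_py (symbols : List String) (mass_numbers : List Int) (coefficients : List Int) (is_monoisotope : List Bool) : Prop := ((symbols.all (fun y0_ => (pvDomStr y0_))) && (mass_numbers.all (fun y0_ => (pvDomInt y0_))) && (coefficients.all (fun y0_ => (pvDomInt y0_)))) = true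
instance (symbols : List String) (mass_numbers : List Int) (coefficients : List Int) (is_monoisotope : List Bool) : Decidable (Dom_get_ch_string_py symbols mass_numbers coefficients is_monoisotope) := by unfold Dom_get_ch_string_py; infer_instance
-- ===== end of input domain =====

-- B replaces A's repeated list.index/pop scans (one rescan per C/H occurrence) by a
-- single zip pass that partitions the entries; the equivalence proved here is about
-- the RETURN value (in Python both A and B also rebuild the argument lists in place,
-- and on equal-length lists they leave the same lists behind).

-- ===== PORT A =====
-- _symbol_to_subformula_str
def pvSubformulaStr (symbol : String) (a : Int) (coefficient : Int) (is_most_abundant : Bool) : String :=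
  let res := symbol
  let res := if is_most_abundant then res else "(" ++ PySem.Int.toStr a ++ res ++ ")"
  if coefficient > 1 then res ++ PySem.Int.toStr coefficient else res

-- the `while True: ind = symbols.index(c); … pop(ind) …` loop for one symbol c;
-- `none` is exactly where Python raises an uncaught IndexError from a pop
def pvExtractLoop (c : String) (res : String) (symbols : List String) (mass_numbers : List Int) (coefficients : List Int) (is_monoisotope : List Bool) : Option (String × List String × List Int × List Int × List Bool) :=
  match PySem.List.index? symbols c with
  | none => some (res, symbols, mass_numbers, coefficients, is_monoisotope)
  | some ind =>
    match PySem.List.pop? coefficients (ind : Int), hs : PySem.List.pop? symbols (ind : Int),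
          PySem.List.pop? mass_numbers (ind : Int), PySem.List.pop? is_monoisotope (ind : Int) with
    | some (c_coefficient, coefficients'), some (c_symbol, symbols'),
      some (c_mass_number, mass_numbers'), some (c_repeated, is_monoisotope') =>
        pvExtractLoop c (res ++ pvSubformulaStr c_symbol c_mass_number c_coefficient c_repeated)
          symbols' mass_numbers' coefficients' is_monoisotope'
    | _, _, _, _ => none
termination_by symbols.length
decreasing_by
  have := PySem.List.length_of_pop?_eq_some symbols hs
  simp at this; omega

def get_ch_string_py (symbols : List String) (mass_numbers : List Int) (coefficients : List Int) (is_monoisotope : List Bool) : String :=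
  match pvExtractLoop "C" "" symbols mass_numbers coefficients is_monoisotope with
  | none => ""  -- Python raises IndexError here; excluded by Pre_
  | some (res, s', m', c', i') =>
    match pvExtractLoop "H" res s' m' c' i' with
    | none => ""  -- Python raises IndexError here; excluded by Pre_
    | some (res2, _, _, _, _) => res2

-- ===== PORT B =====
-- the partitioning body of Source B's single zip loop (the `ks/km/kc/ki` kept lists of
-- Source B only serve the in-place rebuild, which has no Lean counterpart)
def pvPart (q : String × Int × Int × Bool) : String :=
  let p := if q.2.2.2 then q.1 else "(" ++ PySem.Int.toStr q.2.1 ++ q.1 ++ ")"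
  if q.2.2.1 > 1 then p ++ PySem.Int.toStr q.2.2.1 else p

def pvStep (acc : List String × List String) (q : String × Int × Int × Bool) : List String × List String :=
  if q.1 == "C" || q.1 == "H" then
    if q.1 == "C" then (acc.1 ++ [pvPart q], acc.2) else (acc.1, acc.2 ++ [pvPart q])
  else acc

def get_ch_string_py_alt (symbols : List String) (mass_numbers : List Int) (coefficients : List Int) (is_monoisotope : List Bool) : String :=
  let quads := symbols.zip (mass_numbers.zip (coefficients.zip is_monoisotope))
  let parts := quads.foldl pvStep ([], [])
  PySem.Str.join "" (parts.1 ++ parts.2)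

-- ===== PRECONDITION & SPEC =====
-- Pre_ is exactly where A returns: whenever a "C" or "H" entry sits at an index not
-- below the length of each of the other three lists, one of A's pops raises an
-- uncaught IndexError (list.index only ever raises the caught ValueError).
def Pre_get_ch_string_py (symbols : List String) (mass_numbers : List Int) (coefficients : List Int) (is_monoisotope : List Bool) : Prop :=
  ∀ (p : Nat) (hp : p < symbols.length), (symbols[p] = "C" ∨ symbols[p] = "H") →
    p < min mass_numbers.length (min coefficients.length is_monoisotope.length)
instance (symbols : List String) (mass_numbers : List Int) (coefficients : List Int) (is_monoisotope : List Bool) : Decidable (Pre_get_ch_string_py symbols mass_numbers coefficients is_monoisotope) := by unfold Pre_get_ch_string_py; infer_instance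

def pvWitness_get_ch_string_py : List String × List Int × List Int × List Bool :=
  (["C", "O", "H", "C"], [12, 16, 2, 13], [6, 1, 12, 1], [true, true, false, false])

def Spec_get_ch_string_py (symbols : List String) (mass_numbers : List Int) (coefficients : List Int) (is_monoisotope : List Bool) (out : String) : Prop := out = get_ch_string_py_alt symbols mass_numbers coefficients is_monoisotope
instance (symbols : List String) (mass_numbers : List Int) (coefficients : List Int) (is_monoisotope : List Bool) (out : String) : Decidable (Spec_get_ch_string_py symbols mass_numbers coefficients is_monoisotope out) := by unfold Spec_get_ch_string_py; infer_instance

-- ===== CLAIM (what is proved, stated in full; the proofs are below) =====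
def Claim_equal_get_ch_string_py : Prop := ∀ (symbols : List String) (mass_numbers : List Int) (coefficients : List Int) (is_monoisotope : List Bool), Dom_get_ch_string_py symbols mass_numbers coefficients is_monoisotope → Pre_get_ch_string_py symbols mass_numbers coefficients is_monoisotope → Spec_get_ch_string_py symbols mass_numbers coefficients is_monoisotope (get_ch_string_py symbols mass_numbers coefficients is_monoisotope)

-- ===== LEMMAS AND PROOFS =====

-- concatenation of a list of strings, the shape A's `res +=` loop produces
def pvCat (l : List String) : String := l.foldr (· ++ ·) ""

theorem pvCat_nil : pvCat [] = "" := rfl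
theorem pvCat_cons (p : String) (l : List String) : pvCat (p :: l) = p ++ pvCat l := rfl

theorem pvCat_append (l₁ l₂ : List String) : pvCat (l₁ ++ l₂) = pvCat l₁ ++ pvCat l₂ := by
  induction l₁ with
  | nil => rw [List.nil_append, pvCat_nil, String.empty_append]
  | cons p l ih => simp only [List.cons_append, pvCat_cons, ih, String.append_assoc]

theorem join_empty_eq_pvCat (l : List String) : PySem.Str.join "" l = pvCat l := by
  induction l with
  | nil => rfl
  | cons p l ih =>
    cases l with
    | nil =>
      simp [PySem.Str.join, PySem.Chars.join_singleton, pvCat_cons, pvCat_nil,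
        String.ofList_toList, String.append_empty]
    | cons q r =>
      simp only [PySem.Str.join, List.map_cons, PySem.Chars.join_cons_cons] at ih ⊢
      rw [show ("" : String).toList = [] from rfl] at ih ⊢
      rw [pvCat_cons, ← ih]
      apply String.toList_injective
      simp [String.toList_append]

-- the quad list Source B's zip builds
def pvQuads (symbols : List String) (mass_numbers : List Int) (coefficients : List Int) (is_monoisotope : List Bool) : List (String × Int × Int × Bool) :=
  symbols.zip (mass_numbers.zip (coefficients.zip is_monoisotope))

def pvParts (c : String) (l : List (String × Int × Int × Bool)) : List String :=
  (l.filter (fun q => q.1 == c)).map pvPart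

def pvKeep (c : String) (l : List (String × Int × Int × Bool)) : List (String × Int × Int × Bool) :=
  l.filter (fun q => !(q.1 == c))

theorem fst_mem_of_mem_quads {s : List String} {m c : List Int} {i : List Bool}
    {q : String × Int × Int × Bool} (h : q ∈ pvQuads s m c i) : q.1 ∈ s :=
  (List.of_mem_zip h).1

theorem quads_maps (l : List (String × Int × Int × Bool)) :
    pvQuads (l.map (·.1)) (l.map (·.2.1)) (l.map (·.2.2.1)) (l.map (·.2.2.2)) = l := by
  induction l with
  | nil => rfl
  | cons q r ih => simp only [pvQuads, List.map_cons, List.zip_cons_cons] at ih ⊢; rw [ih]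

theorem quads_recover (s : List String) (m co : List Int) (i : List Bool) :
    (pvQuads s m co i).map (·.1) ++ s.drop (pvQuads s m co i).length = s ∧
    (pvQuads s m co i).map (·.2.1) ++ m.drop (pvQuads s m co i).length = m ∧
    (pvQuads s m co i).map (·.2.2.1) ++ co.drop (pvQuads s m co i).length = co ∧
    (pvQuads s m co i).map (·.2.2.2) ++ i.drop (pvQuads s m co i).length = i := by
  induction s generalizing m co i with
  | nil => exact ⟨rfl, by simp [pvQuads], by simp [pvQuads], by simp [pvQuads]⟩
  | cons x s ih =>
    cases m with
    | nil => exact ⟨by simp [pvQuads], rfl, by simp [pvQuads], by simp [pvQuads]⟩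
    | cons y m' =>
      cases co with
      | nil => exact ⟨by simp [pvQuads], by simp [pvQuads], rfl, by simp [pvQuads]⟩
      | cons z co' =>
        cases i with
        | nil => exact ⟨by simp [pvQuads], by simp [pvQuads], by simp [pvQuads], rfl⟩
        | cons w i' =>
          obtain ⟨e1, e2, e3, e4⟩ := ih m' co' i'
          simp only [pvQuads, List.zip_cons_cons, List.map_cons, List.length_cons,
            List.drop_succ_cons, List.cons_append] at e1 e2 e3 e4 ⊢
          rw [e1, e2, e3, e4]
          exact ⟨rfl, rfl, rfl, rfl⟩

theorem quads_append {s₁ s₂ : List String} {m₁ m₂ c₁ c₂ : List Int} {i₁ i₂ : List Bool}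
    (h₁ : s₁.length = m₁.length) (h₂ : s₁.length = c₁.length) (h₃ : s₁.length = i₁.length) :
    pvQuads (s₁ ++ s₂) (m₁ ++ m₂) (c₁ ++ c₂) (i₁ ++ i₂) =
      pvQuads s₁ m₁ c₁ i₁ ++ pvQuads s₂ m₂ c₂ i₂ := by
  unfold pvQuads
  rw [List.zip_append (show c₁.length = i₁.length by omega)]
  rw [List.zip_append (show m₁.length = (c₁.zip i₁).length by simp only [List.length_zip]; omega)]
  rw [List.zip_append (show s₁.length = (m₁.zip (c₁.zip i₁)).length by simp only [List.length_zip]; omega)]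

theorem filter_quads_not_mem {c : String} {s : List String} {m co : List Int} {i : List Bool}
    (hnot : c ∉ s) :
    (pvQuads s m co i).filter (fun q => q.1 == c) = [] ∧
    pvKeep c (pvQuads s m co i) = pvQuads s m co i := by
  have hne : ∀ q ∈ pvQuads s m co i, q.1 ≠ c := by
    intro q hq he
    exact hnot (he ▸ fst_mem_of_mem_quads hq)
  constructor
  · rw [List.filter_eq_nil_iff]
    intro q hq
    simpa using hne q hq
  · unfold pvKeep
    rw [List.filter_eq_self]
    intro q hq
    simpa using hne q hq

theorem pop?_append_cons {α : Type} (l : List α) (x : α) (r : List α) :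
    PySem.List.pop? (l ++ x :: r) (l.length : Int) = some (x, l ++ r) := by
  have h : l.length < (l ++ x :: r).length := by simp
  rw [PySem.List.pop?_natCast _ _ h]
  congr 1
  refine Prod.ext (by simp) ?_
  show (l ++ x :: r).eraseIdx l.length = l ++ r
  rw [List.eraseIdx_append_of_length_le (by omega)]; simp

theorem take_getElem_drop {α : Type} (l : List α) (i : Nat) (h : i < l.length) :
    l.take i ++ l[i] :: l.drop (i + 1) = l := by
  rw [List.getElem_cons_drop]; exact List.take_append_drop i l

theorem part_eq_subformula (x : String) (y z : Int) (w : Bool) :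
    pvPart (x, y, z, w) = pvSubformulaStr x y z w := rfl

-- the invariant of A's per-symbol extraction loop: if every occurrence of c in
-- symbols sits below the length of each other list, every pop succeeds and the
-- loop extracts exactly the c-entries of the zipped quads
theorem extractLoop_spec (c : String) (s : List String) (m co : List Int) (i : List Bool)
    (res : String)
    (hocc : ∀ (p : Nat) (hp : p < s.length), s[p] = c →
      p < min m.length (min co.length i.length)) :
    pvExtractLoop c res s m co i =
      some (res ++ pvCat (pvParts c (pvQuads s m co i)),
        (pvKeep c (pvQuads s m co i)).map (·.1) ++ s.drop (pvQuads s m co i).length,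
        (pvKeep c (pvQuads s m co i)).map (·.2.1) ++ m.drop (pvQuads s m co i).length,
        (pvKeep c (pvQuads s m co i)).map (·.2.2.1) ++ co.drop (pvQuads s m co i).length,
        (pvKeep c (pvQuads s m co i)).map (·.2.2.2) ++ i.drop (pvQuads s m co i).length) := by
  unfold pvExtractLoop
  cases hidx : PySem.List.index? s c with
  | none =>
    have hnot : c ∉ s := (PySem.List.index?_eq_none_iff s c).mp hidx
    obtain ⟨hfilt, hkeep⟩ := filter_quads_not_mem (m := m) (co := co) (i := i) hnot
    obtain ⟨e1, e2, e3, e4⟩ := quads_recover s m co i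
    simp only [pvParts, hfilt, List.map_nil, pvCat_nil, String.append_empty, hkeep,
      e1, e2, e3, e4]
  | some ind =>
    obtain ⟨pre, suf, hse, hlen, hpre⟩ := (PySem.List.index?_eq_some_iff s c ind).mp hidx
    have hind : ind < s.length := by subst hse; simp; omega
    obtain ⟨hk', hsc, -⟩ := PySem.List.getElem_of_index?_eq_some hidx
    have hiL := hocc ind hind hsc
    have him : ind < m.length := by omega
    have hico : ind < co.length := by omega
    have hii : ind < i.length := by omega
    -- decompose the parallel lists at position ind
    have hmd := take_getElem_drop m ind him
    have hcod := take_getElem_drop co ind hico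
    have hid := take_getElem_drop i ind hii
    have hltm : (m.take ind).length = ind := by simp; omega
    have hltco : (co.take ind).length = ind := by simp; omega
    have hlti : (i.take ind).length = ind := by simp; omega
    -- all four pops succeed
    have hpopS : PySem.List.pop? s (ind : Int) = some (c, pre ++ suf) := by
      rw [hse, ← hlen]; exact pop?_append_cons pre c suf
    have hpopM : PySem.List.pop? m (ind : Int) = some (m[ind], m.take ind ++ m.drop (ind + 1)) := by
      have h' := pop?_append_cons (m.take ind) m[ind] (m.drop (ind + 1))
      rw [hltm] at h'
      conv_lhs => rw [← hmd]
      exact h'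
    have hpopCo : PySem.List.pop? co (ind : Int) = some (co[ind], co.take ind ++ co.drop (ind + 1)) := by
      have h' := pop?_append_cons (co.take ind) co[ind] (co.drop (ind + 1))
      rw [hltco] at h'
      conv_lhs => rw [← hcod]
      exact h'
    have hpopI : PySem.List.pop? i (ind : Int) = some (i[ind], i.take ind ++ i.drop (ind + 1)) := by
      have h' := pop?_append_cons (i.take ind) i[ind] (i.drop (ind + 1))
      rw [hlti] at h'
      conv_lhs => rw [← hid]
      exact h'
    simp only [hpopM, hpopCo, hpopI]
    split
    case h_2 hno => exact (hno _ _ _ _ _ _ _ _ rfl hpopS rfl rfl).elim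
    rename_i c_coefficient coefficients' c_symbol symbols' c_mass_number mass_numbers' c_repeated is_monoisotope' heqCo heqS heqM heqI
    rw [hpopS] at heqS
    simp only [Option.some.injEq, Prod.mk.injEq] at heqCo heqS heqM heqI
    obtain ⟨rfl, rfl⟩ := heqCo
    obtain ⟨rfl, rfl⟩ := heqS
    obtain ⟨rfl, rfl⟩ := heqM
    obtain ⟨rfl, rfl⟩ := heqI
    -- the occurrence hypothesis survives the removal of position ind
    have hocc' : ∀ (p : Nat) (hp : p < (pre ++ suf).length), (pre ++ suf)[p] = c →
        p < min (m.take ind ++ m.drop (ind + 1)).length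
          (min (co.take ind ++ co.drop (ind + 1)).length
            (i.take ind ++ i.drop (ind + 1)).length) := by
      intro p hp hc
      by_cases hpi : p < ind
      · exfalso
        rw [List.getElem_append_left (by omega)] at hc
        exact hpre (hc ▸ List.getElem_mem _)
      · have hps : p < s.length - 1 := by subst hse; simp at hp ⊢; omega
        rw [List.getElem_append_right (by omega)] at hc
        have h2 : s[p + 1]'(by omega) = c := by
          subst hse
          rw [List.getElem_append_right (by omega)]
          rw [getElem_congr rfl (show p + 1 - pre.length = (p - pre.length) + 1 by omega)
            (by simp at hps ⊢; omega)]
          rw [List.getElem_cons_succ]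
          exact hc
        have h3 := hocc (p + 1) (by omega) h2
        simp only [List.length_append, List.length_take, List.length_drop]
        omega
    have hrec := extractLoop_spec c (pre ++ suf) (m.take ind ++ m.drop (ind + 1))
      (co.take ind ++ co.drop (ind + 1)) (i.take ind ++ i.drop (ind + 1))
      (res ++ pvSubformulaStr c m[ind] co[ind] i[ind]) hocc'
    rw [hrec]
    -- relate the quad lists of the original and the shortened lists
    have hQ : pvQuads s m co i =
        pvQuads pre (m.take ind) (co.take ind) (i.take ind) ++
          (c, m[ind], co[ind], i[ind]) ::
            pvQuads suf (m.drop (ind + 1)) (co.drop (ind + 1)) (i.drop (ind + 1)) := by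
      conv_lhs => rw [hse, ← hmd, ← hcod, ← hid]
      rw [quads_append (by omega) (by omega) (by omega)]
      rfl
    have hQ' : pvQuads (pre ++ suf) (m.take ind ++ m.drop (ind + 1))
        (co.take ind ++ co.drop (ind + 1)) (i.take ind ++ i.drop (ind + 1)) =
        pvQuads pre (m.take ind) (co.take ind) (i.take ind) ++
          pvQuads suf (m.drop (ind + 1)) (co.drop (ind + 1)) (i.drop (ind + 1)) :=
      quads_append (by omega) (by omega) (by omega)
    obtain ⟨hfiltPre, hkeepPre⟩ :=
      filter_quads_not_mem (m := m.take ind) (co := co.take ind) (i := i.take ind) hpre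
    have hQpre : (pvQuads pre (m.take ind) (co.take ind) (i.take ind)).length = ind := by
      simp only [pvQuads, List.length_zip, hlen, hltm, hltco, hlti]
      omega
    have hparts : pvParts c (pvQuads s m co i) =
        pvSubformulaStr c m[ind] co[ind] i[ind] ::
          pvParts c (pvQuads (pre ++ suf) (m.take ind ++ m.drop (ind + 1))
            (co.take ind ++ co.drop (ind + 1)) (i.take ind ++ i.drop (ind + 1))) := by
      rw [hQ, hQ']
      unfold pvParts
      rw [List.filter_append, List.filter_append, hfiltPre, List.filter_cons]
      simp only [beq_self_eq_true, if_pos, List.nil_append, List.map_cons,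
        part_eq_subformula]
    have hkeepEq : pvKeep c (pvQuads s m co i) =
        pvKeep c (pvQuads (pre ++ suf) (m.take ind ++ m.drop (ind + 1))
          (co.take ind ++ co.drop (ind + 1)) (i.take ind ++ i.drop (ind + 1))) := by
      rw [hQ, hQ']
      unfold pvKeep
      rw [List.filter_append, List.filter_append, List.filter_cons]
      simp only [beq_self_eq_true, Bool.not_true, Bool.false_eq_true]
      simp
    -- the lengths of the two quad lists, and the list tails beyond them
    have hTfull : (pvQuads s m co i).length =
        ind + 1 + (pvQuads suf (m.drop (ind + 1)) (co.drop (ind + 1)) (i.drop (ind + 1))).length := by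
      rw [hQ]
      simp only [List.length_append, List.length_cons, hQpre]
      omega
    have hTrec : (pvQuads (pre ++ suf) (m.take ind ++ m.drop (ind + 1))
        (co.take ind ++ co.drop (ind + 1)) (i.take ind ++ i.drop (ind + 1))).length =
        ind + (pvQuads suf (m.drop (ind + 1)) (co.drop (ind + 1)) (i.drop (ind + 1))).length := by
      rw [hQ']
      simp only [List.length_append, hQpre]
    set Tq := (pvQuads suf (m.drop (ind + 1)) (co.drop (ind + 1)) (i.drop (ind + 1))).length with hTq
    have hdS : (pre ++ suf).drop (ind + Tq) = s.drop (ind + 1 + Tq) := by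
      rw [hse, ← hlen]
      rw [show pre.length + 1 + Tq = pre.length + (1 + Tq) by omega]
      rw [List.drop_length_add_append, List.drop_length_add_append]
      rw [show 1 + Tq = Tq + 1 by omega]
      simp [List.drop_succ_cons]
    have hdM : (m.take ind ++ m.drop (ind + 1)).drop (ind + Tq) = m.drop (ind + 1 + Tq) := by
      rw [show ind + Tq = (m.take ind).length + Tq by rw [hltm]]
      rw [List.drop_length_add_append, List.drop_drop]
    have hdCo : (co.take ind ++ co.drop (ind + 1)).drop (ind + Tq) = co.drop (ind + 1 + Tq) := by
      rw [show ind + Tq = (co.take ind).length + Tq by rw [hltco]]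
      rw [List.drop_length_add_append, List.drop_drop]
    have hdI : (i.take ind ++ i.drop (ind + 1)).drop (ind + Tq) = i.drop (ind + 1 + Tq) := by
      rw [show ind + Tq = (i.take ind).length + Tq by rw [hlti]]
      rw [List.drop_length_add_append, List.drop_drop]
    rw [hparts, hkeepEq, pvCat_cons, ← String.append_assoc, hTfull, hTrec,
      hdS, hdM, hdCo, hdI]
termination_by s.length
decreasing_by subst hse; simp

-- B's fold partitions the quads into the C parts and the H parts
theorem foldl_step_eq (l : List (String × Int × Int × Bool)) (a b : List String) :
    l.foldl pvStep (a, b) = (a ++ pvParts "C" l, b ++ pvParts "H" l) := by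
  induction l generalizing a b with
  | nil => simp [pvParts]
  | cons q r ih =>
    simp only [List.foldl_cons, pvStep, pvParts, List.filter_cons]
    by_cases hc : q.1 = "C"
    · simp only [hc, beq_self_eq_true, Bool.true_or, if_pos]
      rw [ih]
      simp [pvParts]
    · by_cases hh : q.1 = "H"
      · simp only [hh, beq_self_eq_true]
        rw [ih]
        simp [pvParts]
      · have hc' : (q.1 == "C") = false := by simp [hc]
        have hh' : (q.1 == "H") = false := by simp [hh]
        simp only [hc', hh', Bool.or_self, Bool.false_eq_true, if_false]
        rw [ih]
        simp [pvParts]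

theorem parts_H_keep_C (l : List (String × Int × Int × Bool)) :
    pvParts "H" (pvKeep "C" l) = pvParts "H" l := by
  unfold pvParts pvKeep
  rw [List.filter_filter]
  congr 1
  apply List.filter_congr
  intro q _
  by_cases hh : q.1 = "H"
  · simp [hh]
  · simp [hh]

-- ===== VERDICT (by name: the statement is the Claim_ definition above) =====
theorem get_ch_string_py_spec : Claim_equal_get_ch_string_py := by
  intro s m co i _ hpre
  unfold Spec_get_ch_string_py get_ch_string_py get_ch_string_py_alt
  rw [extractLoop_spec "C" s m co i "" (fun p hp hc => hpre p hp (Or.inl hc))]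
  dsimp only
  -- abbreviations for the lists after the C phase
  set Q := pvQuads s m co i with hQdef
  set T := Q.length with hTdef
  set K := pvKeep "C" Q with hKdef
  have hTs : T ≤ s.length := by simp only [hTdef, hQdef, pvQuads, List.length_zip]; omega
  have hTm : T ≤ m.length := by simp only [hTdef, hQdef, pvQuads, List.length_zip]; omega
  have hTco : T ≤ co.length := by simp only [hTdef, hQdef, pvQuads, List.length_zip]; omega
  have hTi : T ≤ i.length := by simp only [hTdef, hQdef, pvQuads, List.length_zip]; omega
  have hKlen : K.length ≤ T := by rw [hKdef]; exact List.length_filter_le _ _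
  -- the H occurrences of the post-C lists still sit inside bounds
  have hH : ∀ (p : Nat) (hp : p < (K.map (·.1) ++ s.drop T).length),
      (K.map (·.1) ++ s.drop T)[p] = "H" →
      p < min (K.map (·.2.1) ++ m.drop T).length
        (min (K.map (·.2.2.1) ++ co.drop T).length (K.map (·.2.2.2) ++ i.drop T).length) := by
    intro p hp hh
    simp only [List.length_append, List.length_map, List.length_drop] at hp ⊢
    by_cases hpK : p < K.length
    · omega
    · rw [List.getElem_append_right (by simp; omega)] at hh
      rw [List.getElem_drop] at hh
      have hb := hpre (T + (p - (K.map (·.1)).length))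
        (by simp at hp ⊢; omega) (Or.inr (by simpa using hh))
      simp only [List.length_map] at hb
      omega
  rw [extractLoop_spec "H" _ _ _ _ _ hH]
  dsimp only
  -- the quads of the post-C lists are exactly the kept quads
  have htail : pvQuads (s.drop T) (m.drop T) (co.drop T) (i.drop T) = [] := by
    apply List.eq_nil_iff_length_eq_zero.mpr
    have : T = min s.length (min m.length (min co.length i.length)) := by
      rw [hTdef, hQdef]; simp [pvQuads, List.length_zip]
    simp only [pvQuads, List.length_zip, List.length_drop]
    omega
  have hquadsK : pvQuads (K.map (·.1) ++ s.drop T) (K.map (·.2.1) ++ m.drop T)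
      (K.map (·.2.2.1) ++ co.drop T) (K.map (·.2.2.2) ++ i.drop T) = K := by
    rw [quads_append (by simp) (by simp) (by simp), quads_maps, htail, List.append_nil]
  rw [hquadsK]
  rw [foldl_step_eq, join_empty_eq_pvCat]
  simp only [List.nil_append, pvCat_append, String.empty_append]
  rw [hKdef, parts_H_keep_C]
  rfl
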